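-- pv_equiv track=rewrite | github.com/sugijotaro/address_label | print_label.py | convert_alphabet_half_width_to_full_width
-- ===== SOURCE A (Python) =====
-- def convert_alphabet_half_width_to_full_width(input_str: str) -> str:
--     output_str = ""
--     for ch in input_str:
--         if ch >= 'A' and ch <= 'Z':
--             code_point = ord(ch)
--             ch_full_width = chr(code_point + 65248)
--             output_str += ch_full_width
--         else:
--             output_str += ch
--     return output_str
-- ===== SOURCE B (Python) =====
-- def convert_alphabet_half_width_to_full_width(input_str: str) -> str:
--     # Staged passes: one whole-string replace per alphabet letter, looping over
--     # the alphabet instead of over the input. Correct because a replacement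
--     # result (a full-width letter) is never itself a half-width A-Z letter,
--     # so the 26 passes do not interfere.
--     s = input_str
--     for ch in "ABCDEFGHIJKLMNOPQRSTUVWXYZ":
--         s = s.replace(ch, chr(ord(ch) + 65248))
--     return s
-- ===== Notes on version B (the rewrite author's own statement) =====
-- stated objective: faster
-- what changed: B loops over the 26 alphabet letters and does one whole-string replace per letter (26 staged bulk passes), instead of A's single per-character Python loop with a branch and string concatenation.
import Mathlib
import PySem

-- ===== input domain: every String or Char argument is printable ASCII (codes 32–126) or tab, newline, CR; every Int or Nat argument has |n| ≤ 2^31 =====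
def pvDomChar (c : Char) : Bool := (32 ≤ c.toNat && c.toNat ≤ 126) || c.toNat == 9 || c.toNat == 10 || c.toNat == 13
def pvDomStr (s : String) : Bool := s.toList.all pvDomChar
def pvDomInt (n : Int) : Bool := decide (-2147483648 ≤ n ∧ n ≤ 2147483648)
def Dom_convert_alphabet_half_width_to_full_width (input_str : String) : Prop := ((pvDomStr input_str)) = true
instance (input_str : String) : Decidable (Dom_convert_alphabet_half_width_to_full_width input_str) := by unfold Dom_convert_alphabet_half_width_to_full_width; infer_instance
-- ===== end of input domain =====

-- B replaces A's per-character pass (branch + concatenation) by 26 staged whole-string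
-- replace passes, one per alphabet letter; the passes cannot interfere since a full-width
-- replacement letter is never a half-width A-Z letter.

-- ===== PORT A =====
-- output_str accumulator; for ch in input_str; branch, += one char
def convert_alphabet_half_width_to_full_width (input_str : String) : String :=
  input_str.toList.foldl
    (fun output_str ch =>
      if 'A' ≤ ch ∧ ch ≤ 'Z' then
        output_str.push (Char.ofNat (ch.toNat + 65248))
      else
        output_str.push ch)
    ""

-- ===== PORT B =====
-- for ch in "A..Z": s = s.replace(ch, chr(ord(ch) + 65248))
def convert_alphabet_half_width_to_full_width_alt (input_str : String) : String :=
  "ABCDEFGHIJKLMNOPQRSTUVWXYZ".toList.foldl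
    (fun s ch =>
      PySem.Str.replace s (String.ofList [ch]) (String.ofList [Char.ofNat (ch.toNat + 65248)]))
    input_str

-- ===== PRECONDITION & SPEC =====
def Spec_convert_alphabet_half_width_to_full_width (input_str : String) (out : String) : Prop := out = convert_alphabet_half_width_to_full_width_alt input_str
instance (input_str : String) (out : String) : Decidable (Spec_convert_alphabet_half_width_to_full_width input_str out) := by unfold Spec_convert_alphabet_half_width_to_full_width; infer_instance

-- ===== CLAIM (what is proved, stated in full; the proofs are below) =====
def Claim_equal_convert_alphabet_half_width_to_full_width : Prop := ∀ (input_str : String), Dom_convert_alphabet_half_width_to_full_width input_str → Spec_convert_alphabet_half_width_to_full_width input_str (convert_alphabet_half_width_to_full_width input_str)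

-- ===== LEMMAS AND PROOFS =====

-- replace.go with a single-char pattern is a pointwise map
theorem go_single (c d : Char) (fuel : Nat) (l acc : List Char) (h : l.length ≤ fuel) :
    PySem.Chars.replace.go [c] [d] fuel l acc
      = acc.reverse ++ l.map (fun x => if x = c then d else x) := by
  induction fuel generalizing l acc with
  | zero =>
    have : l = [] := List.length_eq_zero_iff.mp (Nat.le_zero.mp h)
    subst this
    simp [PySem.Chars.replace.go]
  | succ n ih =>
    cases l with
    | nil => simp [PySem.Chars.replace.go]
    | cons x t =>
      rw [PySem.Chars.replace.go]
      by_cases hx : x = c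
      · subst hx
        have hp : List.isPrefixOf [x] (x :: t) = true := by
          simp [List.isPrefixOf]
        simp only [hp, if_true, List.length_singleton, List.drop_succ_cons, List.drop_zero,
          List.reverse_singleton]
        rw [ih t ([d] ++ acc) (by simpa using Nat.lt_succ_iff.mp (by simpa using h))]
        simp [List.map_cons]
      · have hp : List.isPrefixOf [c] (x :: t) = false := by
          simp [List.isPrefixOf, beq_eq_false_iff_ne.mpr (fun he => hx he.symm)]
        simp only [hp, Bool.false_eq_true, if_false]
        rw [ih t (x :: acc) (by simpa using Nat.lt_succ_iff.mp (by simpa using h))]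
        simp [hx]

-- single-char replace = map
theorem replace_single (c d : Char) (cs : List Char) :
    PySem.Chars.replace cs [c] [d] = cs.map (fun x => if x = c then d else x) := by
  rw [PySem.Chars.replace]
  simp only [List.isEmpty_cons, Bool.false_eq_true, if_false]
  simpa using go_single c d cs.length cs [] le_rfl

-- fold of maps = map of the folded per-character function
theorem foldl_map_map (g : Char → Char → Char) (L : List Char) (cs : List Char) :
    L.foldl (fun acc ch => acc.map (g ch)) cs
      = cs.map (fun x => L.foldl (fun y ch => g ch y) x) := by
  induction L generalizing cs with
  | nil => simp
  | cons a t ih => simp [List.foldl_cons, ih, List.map_map, Function.comp]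

-- per-character agreement on the ASCII domain
theorem char_step (x : Char) (hx : pvDomChar x = true) :
    ("ABCDEFGHIJKLMNOPQRSTUVWXYZ".toList.foldl
        (fun y ch => if y = ch then Char.ofNat (ch.toNat + 65248) else y) x)
      = (if 'A' ≤ x ∧ x ≤ 'Z' then Char.ofNat (x.toNat + 65248) else x) := by
  have hc : x = Char.ofNat x.toNat := (Char.ofNat_toNat x).symm
  have hb : (32 ≤ x.toNat ∧ x.toNat ≤ 126) ∨ x.toNat = 9 ∨ x.toNat = 10 ∨ x.toNat = 13 := by
    simp only [pvDomChar, Bool.or_eq_true, Bool.and_eq_true, decide_eq_true_eq,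
      beq_iff_eq] at hx
    tauto
  rcases hb with ⟨h1, h2⟩ | h | h | h
  · interval_cases h : x.toNat <;> rw [hc] <;> decide
  all_goals rw [hc, h]; decide

-- A's fold-with-push, seen through toList
theorem foldl_push_toList (g : Char → Char) (l : List Char) (acc : String) :
    (l.foldl (fun out ch => out.push (g ch)) acc).toList = acc.toList ++ l.map g := by
  induction l generalizing acc with
  | nil => simp
  | cons c t ih => simp [ih]

-- B, computed through toList: a single map of the folded per-char function
theorem alt_toList (s : String) :
    (convert_alphabet_half_width_to_full_width_alt s).toList
      = s.toList.map (fun x =>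
          "ABCDEFGHIJKLMNOPQRSTUVWXYZ".toList.foldl
            (fun y ch => if y = ch then Char.ofNat (ch.toNat + 65248) else y) x) := by
  unfold convert_alphabet_half_width_to_full_width_alt
  have key : ∀ (L : List Char) (t : String),
      (L.foldl (fun s ch =>
          PySem.Str.replace s (String.ofList [ch]) (String.ofList [Char.ofNat (ch.toNat + 65248)])) t).toList
        = L.foldl (fun acc ch => acc.map (fun x => if x = ch then Char.ofNat (ch.toNat + 65248) else x)) t.toList := by
    intro L
    induction L with
    | nil => intro t; rfl
    | cons a tl ih =>
      intro t
      rw [List.foldl_cons, List.foldl_cons, ih]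
      congr 1
      simp [PySem.Str.replace, replace_single]
  rw [key, foldl_map_map]

-- ===== VERDICT (by name: the statement is the Claim_ definition above) =====
theorem convert_alphabet_half_width_to_full_width_spec : Claim_equal_convert_alphabet_half_width_to_full_width := by
  intro s hdom
  unfold Spec_convert_alphabet_half_width_to_full_width
  apply String.toList_inj.mp
  rw [alt_toList]
  unfold convert_alphabet_half_width_to_full_width
  have hf : (fun (out : String) (ch : Char) =>
      if 'A' ≤ ch ∧ ch ≤ 'Z' then out.push (Char.ofNat (ch.toNat + 65248)) else out.push ch)
      = (fun out ch => out.push (if 'A' ≤ ch ∧ ch ≤ 'Z' then Char.ofNat (ch.toNat + 65248) else ch)) := by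
    funext out ch; split_ifs <;> rfl
  rw [hf, foldl_push_toList]
  have hmem : ∀ x ∈ s.toList, pvDomChar x = true := by
    intro x hxm
    exact List.all_eq_true.mp hdom x hxm
  simp only [String.toList_empty, List.nil_append]
  apply List.map_congr_left
  intro x hxm
  exact (char_step x (hmem x hxm)).symm
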